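-- pv_equiv track=rewrite | github.com/aleahfaa/Individual-Projects | Devcode Weekly Challenge/#1 - Jujutsu Kaisen/case3.py | pemenangPertarungan
-- ===== SOURCE A (Python) =====
-- def pemenangPertarungan(yujiltadori, rohKutukan):
--     unggulan_yuji = sum(1 for i in range(len(yujiltadori)) if yujiltadori[i] > rohKutukan[i])
--     unggulan_roh = sum(1 for i in range(len(rohKutukan)) if rohKutukan[i] > yujiltadori[i])
--
--     if unggulan_yuji > unggulan_roh:
--         return 'Yuji Itadori'
--     elif unggulan_roh > unggulan_yuji:
--         return 'Roh Kutukan'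
--     else:
--         return 'Keduanya Imbang'
-- ===== SOURCE B (Python) =====
-- def pemenangPertarungan(yujiltadori, rohKutukan):
--     def score(lo, hi):
--         if hi - lo == 0:
--             return 0
--         if hi - lo == 1:
--             return (yujiltadori[lo] > rohKutukan[lo]) - (rohKutukan[lo] > yujiltadori[lo])
--         mid = (lo + hi) // 2
--         return score(lo, mid) + score(mid, hi)
--     s = score(0, len(yujiltadori))
--     if s > 0:
--         return 'Yuji Itadori'
--     if s < 0:
--         return 'Roh Kutukan'
--     return 'Keduanya Imbang'
-- ===== Notes on version B (the rewrite author's own statement) =====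
-- stated objective: alternative
-- what changed: Replaces A's two linear counting passes with one counter each by a divide-and-conquer recursion that splits the index range in half and combines the halves' net scores, deciding the winner from the sign of the root score.
import Mathlib
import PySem

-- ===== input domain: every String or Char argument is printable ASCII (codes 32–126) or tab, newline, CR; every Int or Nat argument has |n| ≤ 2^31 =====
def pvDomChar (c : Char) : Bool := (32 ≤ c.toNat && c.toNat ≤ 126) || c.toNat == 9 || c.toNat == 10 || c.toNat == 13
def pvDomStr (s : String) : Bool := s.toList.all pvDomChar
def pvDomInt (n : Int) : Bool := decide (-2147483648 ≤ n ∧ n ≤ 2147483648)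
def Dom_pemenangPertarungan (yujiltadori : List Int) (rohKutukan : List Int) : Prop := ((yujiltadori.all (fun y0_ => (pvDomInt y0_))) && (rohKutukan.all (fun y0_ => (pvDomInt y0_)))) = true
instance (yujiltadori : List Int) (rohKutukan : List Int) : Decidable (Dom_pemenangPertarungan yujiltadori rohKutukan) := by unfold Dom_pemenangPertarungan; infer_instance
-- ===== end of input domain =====

-- B replaces A's two linear counting passes by a divide-and-conquer recursion over the
-- index range combining net scores of the two halves (objective: alternative).

-- ===== PORT A =====
-- sum(1 for i in range(len(xs)) if xs[i] > ys[i]); in-range on Pre_, pyGetD is exact there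
def pvCountGt (xs ys : List Int) : Int :=
  (PySem.List.pyRange 0 xs.length 1).foldl
    (fun acc i => if PySem.List.pyGetD xs i 0 > PySem.List.pyGetD ys i 0 then acc + 1 else acc) 0

def pemenangPertarungan (yujiltadori : List Int) (rohKutukan : List Int) : String :=
  let unggulanYuji := pvCountGt yujiltadori rohKutukan
  let unggulanRoh := pvCountGt rohKutukan yujiltadori
  if unggulanYuji > unggulanRoh then "Yuji Itadori"
  else if unggulanRoh > unggulanYuji then "Roh Kutukan"
  else "Keduanya Imbang"

-- ===== PORT B =====
-- score(lo, hi): Python returns 0 when hi - lo == 0; B only ever calls it with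
-- 0 ≤ lo ≤ hi, so the '≤' in the first guard is purely a totality guard.
def pvScore (y r : List Int) (lo hi : Int) : Int :=
  if hi - lo ≤ 0 then 0
  else if hi - lo = 1 then
    (if PySem.List.pyGetD y lo 0 > PySem.List.pyGetD r lo 0 then (1 : Int) else 0)
      - (if PySem.List.pyGetD r lo 0 > PySem.List.pyGetD y lo 0 then (1 : Int) else 0)
  else
    pvScore y r lo (PySem.Int.floordiv (lo + hi) 2)
      + pvScore y r (PySem.Int.floordiv (lo + hi) 2) hi
termination_by (hi - lo).toNat
decreasing_by
  all_goals
    rw [PySem.Int.floordiv_eq_ediv_of_pos (by norm_num : (0:Int) < 2)]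
    omega

def pemenangPertarungan_alt (yujiltadori : List Int) (rohKutukan : List Int) : String :=
  let s := pvScore yujiltadori rohKutukan 0 (yujiltadori.length : Int)
  if s > 0 then "Yuji Itadori"
  else if s < 0 then "Roh Kutukan"
  else "Keduanya Imbang"

-- ===== PRECONDITION & SPEC =====
-- A indexes each list by the other's range, so any length mismatch raises IndexError.
def Pre_pemenangPertarungan (yujiltadori : List Int) (rohKutukan : List Int) : Prop :=
  yujiltadori.length = rohKutukan.length
instance (yujiltadori : List Int) (rohKutukan : List Int) : Decidable (Pre_pemenangPertarungan yujiltadori rohKutukan) := by unfold Pre_pemenangPertarungan; infer_instance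
def pvWitness_pemenangPertarungan : List Int × List Int := ([1, 5, 2], [3, 1, 2])

def Spec_pemenangPertarungan (yujiltadori : List Int) (rohKutukan : List Int) (out : String) : Prop := out = pemenangPertarungan_alt yujiltadori rohKutukan
instance (yujiltadori : List Int) (rohKutukan : List Int) (out : String) : Decidable (Spec_pemenangPertarungan yujiltadori rohKutukan out) := by unfold Spec_pemenangPertarungan; infer_instance

-- ===== CLAIM (what is proved, stated in full; the proofs are below) =====
def Claim_equal_pemenangPertarungan : Prop := ∀ (yujiltadori : List Int) (rohKutukan : List Int), Dom_pemenangPertarungan yujiltadori rohKutukan → Pre_pemenangPertarungan yujiltadori rohKutukan → Spec_pemenangPertarungan yujiltadori rohKutukan (pemenangPertarungan yujiltadori rohKutukan)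

-- ===== LEMMAS AND PROOFS =====

-- Generic: a count-if fold is a 0/1 sum.
theorem foldl_ite_count (f : Int → Prop) [DecidablePred f] (l : List Int) (c : Int) :
    l.foldl (fun acc i => if f i then acc + 1 else acc) c
      = c + (l.map (fun i => if f i then (1 : Int) else 0)).sum := by
  induction l generalizing c with
  | nil => simp
  | cons a t ih =>
    simp only [List.foldl_cons, List.map_cons, List.sum_cons]
    by_cases h : f a
    · rw [if_pos h, if_pos h, ih]; ring
    · rw [if_neg h, if_neg h, ih]; ring

-- A's counting fold over indices is a 0/1 sum over the same range.
theorem pvCountGt_eq_sum (xs ys : List Int) :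
    pvCountGt xs ys
      = ((PySem.List.pyRange 0 xs.length 1).map
          (fun i => if PySem.List.pyGetD xs i 0 > PySem.List.pyGetD ys i 0 then (1 : Int) else 0)).sum := by
  unfold pvCountGt
  rw [foldl_ite_count (fun i => PySem.List.pyGetD xs i 0 > PySem.List.pyGetD ys i 0)]
  ring

-- B's divide-and-conquer score is the sum of per-index signs over the range.
theorem pvScore_eq_sum (y r : List Int) (lo hi : Int) :
    pvScore y r lo hi
      = ((PySem.List.pyRange lo hi 1).map
          (fun i => (if PySem.List.pyGetD y i 0 > PySem.List.pyGetD r i 0 then (1 : Int) else 0)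
            - (if PySem.List.pyGetD r i 0 > PySem.List.pyGetD y i 0 then (1 : Int) else 0))).sum := by
  have H : ∀ (n : Nat) (lo hi : Int), (hi - lo).toNat ≤ n → pvScore y r lo hi
      = ((PySem.List.pyRange lo hi 1).map
          (fun i => (if PySem.List.pyGetD y i 0 > PySem.List.pyGetD r i 0 then (1 : Int) else 0)
            - (if PySem.List.pyGetD r i 0 > PySem.List.pyGetD y i 0 then (1 : Int) else 0))).sum := by
    intro n
    induction n with
    | zero =>
      intro lo hi h
      rw [pvScore.eq_def, if_pos (by omega : hi - lo ≤ 0),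
          PySem.List.pyRange_one_eq_nil (by omega : hi ≤ lo)]
      simp
    | succ n ih =>
      intro lo hi h
      rw [pvScore.eq_def]
      by_cases h0 : hi - lo ≤ 0
      · rw [if_pos h0, PySem.List.pyRange_one_eq_nil (by omega : hi ≤ lo)]; simp
      · rw [if_neg h0]
        by_cases h1 : hi - lo = 1
        · rw [if_pos h1]
          have he : hi = lo + 1 := by omega
          subst he
          rw [PySem.List.pyRange_one_singleton]
          simp
        · rw [if_neg h1]
          have hmid : lo + 1 ≤ PySem.Int.floordiv (lo + hi) 2
              ∧ PySem.Int.floordiv (lo + hi) 2 + 1 ≤ hi := by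
            rw [PySem.Int.floordiv_eq_ediv_of_pos (by norm_num : (0:Int) < 2)]
            omega
          rw [ih lo (PySem.Int.floordiv (lo + hi) 2) (by omega),
              ih (PySem.Int.floordiv (lo + hi) 2) hi (by omega),
              PySem.List.pyRange_one_append lo (PySem.Int.floordiv (lo + hi) 2) hi
                (by omega) (by omega), List.map_append, List.sum_append]
  exact H (hi - lo).toNat lo hi le_rfl

theorem sum_map_sub_int (l : List Int) (f g : Int → Int) :
    (l.map (fun i => f i - g i)).sum = (l.map f).sum - (l.map g).sum := by
  induction l with
  | nil => simp
  | cons a t ih => simp [ih]; ring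

-- ===== VERDICT (by name: the statement is the Claim_ definition above) =====
theorem pemenangPertarungan_spec : Claim_equal_pemenangPertarungan := by
  intro y r _ hpre
  unfold Spec_pemenangPertarungan pemenangPertarungan pemenangPertarungan_alt
  rw [pvCountGt_eq_sum y r, pvCountGt_eq_sum r y, pvScore_eq_sum, sum_map_sub_int]
  have hlen : (r.length : Int) = (y.length : Int) := by exact_mod_cast hpre.symm
  rw [hlen]
  set cy : Int := ((PySem.List.pyRange 0 (y.length : Int) 1).map
    (fun i => if PySem.List.pyGetD y i 0 > PySem.List.pyGetD r i 0 then (1 : Int) else 0)).sum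
  set cr : Int := ((PySem.List.pyRange 0 (y.length : Int) 1).map
    (fun i => if PySem.List.pyGetD r i 0 > PySem.List.pyGetD y i 0 then (1 : Int) else 0)).sum
  by_cases h1 : cy > cr
  · rw [if_pos h1, if_pos (by omega : cy - cr > 0)]
  · rw [if_neg h1]
    by_cases h2 : cr > cy
    · rw [if_pos h2, if_neg (by omega : ¬ cy - cr > 0), if_pos (by omega : cy - cr < 0)]
    · rw [if_neg h2, if_neg (by omega : ¬ cy - cr > 0), if_neg (by omega : ¬ cy - cr < 0)]
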